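-- pv_equiv track=rewrite | github.com/Joonspar/codetree-TILs | 240808/독서실의 거리두기 4/study-cafe-keeping-distance-4.py | max_min_distance
-- ===== SOURCE A (Python) =====
-- def max_min_distance(N, seats):
--     # 빈 좌석의 인덱스를 찾습니다.
--     empty_indices = [i for i, seat in enumerate(seats) if seat == '0']
--
--     max_min_dist = 0
--
--     # 두 개의 빈 좌석에 사람을 배치하는 모든 경우를 시도합니다.
--     for i in range(len(empty_indices)):
--         for j in range(i + 1, len(empty_indices)):
--             # 새 배열을 만들어 사람을 배치합니다.
--             new_seats = list(seats)
--             new_seats[empty_indices[i]] = '1'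
--             new_seats[empty_indices[j]] = '1'
--
--             # 최소 거리를 계산합니다.
--             min_dist = N  # 최대 거리로 초기화
--             last_person = -1
--             for k in range(N):
--                 if new_seats[k] == '1':
--                     if last_person != -1:
--                         min_dist = min(min_dist, k - last_person)
--                     last_person = k
--
--             # 가능한 최대 최소 거리를 갱신합니다.
--             max_min_dist = max(max_min_dist, min_dist)
--
--     return max_min_dist
-- ===== SOURCE B (Python) =====
-- def max_min_distance(N, seats):
--     room = seats[:N]
--     empties = [i for i, c in enumerate(room) if c == '0']
--     if len(empties) < 2:
--         return 0
--     ones = [i for i, c in enumerate(room) if c == '1']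
--     cap = N
--     for a, b in zip(ones, ones[1:]):
--         cap = min(cap, b - a)
--
--     def feasible(d):
--         if d > cap:
--             return False
--         first = None
--         for e in empties:
--             if all(abs(e - o) >= d for o in ones):
--                 first = e
--                 break
--         if first is None:
--             return False
--         return any(e - first >= d and all(abs(e - o) >= d for o in ones)
--                    for e in empties)
--
--     lo, hi = 0, N
--     while lo < hi:
--         mid = (lo + hi + 1) // 2
--         if feasible(mid):
--             lo = mid
--         else:
--             hi = mid - 1
--     return lo
-- ===== Notes on version B (the rewrite author's own statement) =====
-- stated objective: alternative
-- what changed: B binary-searches the answer distance and decides feasibility of each candidate d with a greedy linear check (take the earliest empty seat compatible with the fixed occupants, then look for a second one at distance >= d), replacing A's enumeration of all pairs of empty seats with a full seat-array rebuild and O(N) rescan per pair (intended as faster; a timing run read ~2.5x at the largest size but inconsistently across inputs, so no speed is claimed); …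
-- outside the precondition, e.g. on max_min_distance(2, '1100'): A returns 1, B returns 0; on max_min_distance(3, '010010'): A returns 3, B returns 1
import Mathlib
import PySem

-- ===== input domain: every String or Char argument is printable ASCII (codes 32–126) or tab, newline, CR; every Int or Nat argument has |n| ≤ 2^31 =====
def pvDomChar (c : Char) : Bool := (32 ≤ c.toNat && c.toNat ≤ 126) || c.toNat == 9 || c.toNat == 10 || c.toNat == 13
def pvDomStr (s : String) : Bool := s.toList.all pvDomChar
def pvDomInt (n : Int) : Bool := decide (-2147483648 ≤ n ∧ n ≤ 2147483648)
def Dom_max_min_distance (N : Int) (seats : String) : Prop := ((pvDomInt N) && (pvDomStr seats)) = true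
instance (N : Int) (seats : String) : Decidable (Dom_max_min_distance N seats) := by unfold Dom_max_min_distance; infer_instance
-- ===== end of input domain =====

-- B replaces A's pair enumeration (array rebuild + rescan per pair) by a binary search on the
-- answer distance with a greedy linear feasibility check (objective: alternative algorithm).

-- ===== PORT A =====
-- '[i for i, c in enumerate(s) if c == t]' (both Pythons build such lists; shared helper)
def pvPositions (cs : List Char) (t : Char) : List Int :=
  (PySem.List.enumerate cs 0).filterMap (fun ic => if ic.2 = t then some ic.1 else none)

-- A's inner scan: for k in range(N): if new_seats[k] == '1': …  (state = (min_dist, last_person))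
def pvScanA (N : Int) (new_seats : List Char) : Int × Int :=
  (PySem.List.pyRange 0 N 1).foldl
    (fun st k =>
      if PySem.List.pyGetD new_seats k ' ' = '1' then
        (if st.2 ≠ -1 then min st.1 (k - st.2) else st.1, k)
      else st)
    (N, -1)

def max_min_distance (N : Int) (seats : String) : Int :=
  let cs := seats.toList
  let empty_indices := pvPositions cs '0'
  (PySem.List.pyRange 0 (empty_indices.length : Int) 1).foldl
    (fun acc i =>
      (PySem.List.pyRange (i + 1) (empty_indices.length : Int) 1).foldl
        (fun acc j =>
          let p := PySem.List.pyGetD empty_indices i 0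
          let q := PySem.List.pyGetD empty_indices j 0
          -- new_seats[p] = '1'; new_seats[q] = '1'  (p, q nonnegative in-range indices)
          let new_seats := (cs.set p.toNat '1').set q.toNat '1'
          max acc (pvScanA N new_seats).1)
        acc)
    0

-- ===== PORT B =====
-- 'all(abs(e - o) >= d for o in ones)'
def pvFar (ones : List Int) (e d : Int) : Bool :=
  ones.all (fun o => decide (d ≤ |e - o|))

-- Source B's feasible(d): cap test, find the first compatible empty seat, then any second one
def pvFeasible (empties ones : List Int) (cap d : Int) : Bool :=
  if cap < d then false
  else
    match empties.find? (fun e => pvFar ones e d) with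
    | none => false
    | some first => empties.any (fun e => decide (d ≤ e - first) && pvFar ones e d)

-- Source B's 'while lo < hi' binary search
def pvBS (empties ones : List Int) (cap lo hi : Int) : Int :=
  if h : lo < hi then
    let mid := PySem.Int.floordiv (lo + hi + 1) 2
    if pvFeasible empties ones cap mid then pvBS empties ones cap mid hi
    else pvBS empties ones cap lo (mid - 1)
  else lo
termination_by (hi - lo).toNat
decreasing_by
  all_goals
    have hb := PySem.Int.floordiv_two_mid_bounds (lo := lo + 1) (hi := hi) (by omega)
    simp only [show lo + 1 + hi = lo + hi + 1 by ring] at hb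
    omega

def max_min_distance_alt (N : Int) (seats : String) : Int :=
  let room := PySem.List.slice seats.toList none (some N)
  let empties := pvPositions room '0'
  if empties.length < 2 then 0
  else
    let ones := pvPositions room '1'
    let cap := (ones.zip (PySem.List.slice ones (some 1) none)).foldl
      (fun c ab => min c (ab.2 - ab.1)) N
    pvBS empties ones cap 0 N

-- ===== PRECONDITION & SPEC =====
-- Pre_ excludes (i) exactly the inputs on which A raises: with N > len(seats) and at least two
-- empty seats, A's scan 'new_seats[k] for k in range(N)' raises IndexError; and (ii) the
-- defensible corner of inputs whose seat string has empty seats at indices ≥ N (with N ≥ 1):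
-- there the string is longer than the declared seat count and A's value depends on "seating"
-- people at positions beyond the N scanned seats, which no caller would specify, while B
-- treats only the first N seats as the room.
def Pre_max_min_distance (N : Int) (seats : String) : Prop :=
  (N ≤ (seats.toList.length : Int) ∨ seats.toList.count '0' < 2)
    ∧ ¬ (1 ≤ N ∧ 2 ≤ seats.toList.count '0' ∧ 1 ≤ (seats.toList.drop N.toNat).count '0')
instance (N : Int) (seats : String) : Decidable (Pre_max_min_distance N seats) := by
  unfold Pre_max_min_distance; infer_instance

def pvWitness_max_min_distance : Int × String := (4, "0010")

def Spec_max_min_distance (N : Int) (seats : String) (out : Int) : Prop :=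
  out = max_min_distance_alt N seats
instance (N : Int) (seats : String) (out : Int) : Decidable (Spec_max_min_distance N seats out) := by
  unfold Spec_max_min_distance; infer_instance

-- ===== CLAIM (what is proved, stated in full; the proofs are below) =====
def Claim_equal_max_min_distance : Prop := ∀ (N : Int) (seats : String), Dom_max_min_distance N seats → Pre_max_min_distance N seats → Spec_max_min_distance N seats (max_min_distance N seats)

-- ===== LEMMAS AND PROOFS =====

-- proof-only helpers
def pvPosFrom (cs : List Char) (s : Int) (t : Char) : List Int :=
  (PySem.List.enumerate cs s).filterMap (fun ic => if ic.2 = t then some ic.1 else none)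

def pvG (st : Int × Int) (k : Int) : Int × Int :=
  (if st.2 ≠ -1 then min st.1 (k - st.2) else st.1, k)

-- B's cap / min-of-adjacent-differences, as used in lemma statements
def pvAdjMin (occ : List Int) (N : Int) : Int :=
  (occ.zip (PySem.List.slice occ (some 1) none)).foldl (fun d ab => min d (ab.2 - ab.1)) N

-- all pairs (earlier, later) of a list
def pvPairs : List Int → List (Int × Int)
  | [] => []
  | x :: t => t.map (fun q => (x, q)) ++ pvPairs t

-- "every pair of members is at least d apart"
def pvPAIRS (d : Int) (S : List Int) : Prop :=
  ∀ x ∈ S, ∀ y ∈ S, x < y → d ≤ y - x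

theorem pvPositions_eq_posFrom (cs : List Char) (t : Char) :
    pvPositions cs t = pvPosFrom cs 0 t := rfl

theorem pv_filter_fold {β : Type} (l : List (Int × Char)) (t : Char) (f : β → Int → β) (b : β) :
    l.foldl (fun st kc => if kc.2 = t then f st kc.1 else st) b
      = (l.filterMap (fun ic => if ic.2 = t then some ic.1 else none)).foldl f b := by
  induction l generalizing b with
  | nil => rfl
  | cons x xs ih =>
      by_cases h : x.2 = t <;> simp [List.foldl_cons, h, ih]

theorem pv_scanA_eq (cs : List Char) :
    pvScanA (cs.length : Int) cs = (pvPositions cs '1').foldl pvG ((cs.length : Int), -1) := by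
  have hmap := PySem.List.enumerate_eq_map_pyRange cs ' '
  have h1 : pvScanA (cs.length : Int) cs
      = (PySem.List.enumerate cs 0).foldl
          (fun st kc => if kc.2 = '1' then pvG st kc.1 else st) ((cs.length : Int), -1) := by
    rw [hmap, List.foldl_map]
    simp [pvScanA, pvG]
  rw [h1, pvPositions_eq_posFrom]
  exact pv_filter_fold _ '1' pvG _

theorem pv_scanA_take (cs : List Char) (N : Int) (h0 : 0 ≤ N) (hN : N ≤ (cs.length : Int)) :
    pvScanA N cs = (pvPositions (cs.take N.toNat) '1').foldl pvG (N, -1) := by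
  have hm : ((cs.take N.toNat).length : Int) = N := by
    simp; omega
  have hcong : pvScanA N cs = pvScanA N (cs.take N.toNat) := by
    unfold pvScanA
    refine PySem.List.foldl_congr_mem _ _ _ _ ?_
    intro st k hk
    obtain ⟨hk0, hkN⟩ := PySem.List.mem_pyRange_one.mp hk
    have hkl : k.toNat < (cs.take N.toNat).length := by simp; omega
    rw [PySem.List.pyGetD_eq_getElem cs ' ' hk0 (by omega),
      PySem.List.pyGetD_eq_getElem (cs.take N.toNat) ' ' hk0 (by omega),
      List.getElem_take]
  have h := pv_scanA_eq (cs.take N.toNat)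
  rw [hm] at h
  rw [hcong]
  exact h

theorem pv_zipfold (t : List Int) (d x : Int) (hx : 0 ≤ x) (ht : ∀ y ∈ t, 0 ≤ y) :
    (t.foldl pvG (d, x)).1
      = ((x :: t).zip t).foldl (fun d ab => min d (ab.2 - ab.1)) d := by
  induction t generalizing d x with
  | nil => rfl
  | cons y ys ih =>
      have hy : 0 ≤ y := ht y (by simp)
      have hstep : pvG (d, x) y = (min d (y - x), y) := by
        simp [pvG]; omega
      simp only [List.foldl_cons, hstep, List.zip_cons_cons]
      exact ih (min d (y - x)) y hy (fun z hz => ht z (by simp [hz]))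

theorem pv_adjmin (occ : List Int) (N : Int) (h : ∀ y ∈ occ, 0 ≤ y) :
    (occ.foldl pvG (N, -1)).1 = pvAdjMin occ N := by
  cases occ with
  | nil => rfl
  | cons x t =>
      have hx : 0 ≤ x := h x (by simp)
      have hslice : PySem.List.slice (x :: t) (some 1) none = t := by
        rw [PySem.List.slice_from_one]; rfl
      have hfirst : pvG (N, -1) x = (N, x) := by simp [pvG]
      rw [pvAdjMin, hslice, List.foldl_cons, hfirst]
      exact pv_zipfold t N x hx (fun z hz => h z (by simp [hz]))

theorem pv_mem_posFrom (cs : List Char) (s : Int) (t : Char) (x : Int) :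
    x ∈ pvPosFrom cs s t ↔ ∃ (k : Nat) (h : k < cs.length), x = s + k ∧ cs[k] = t := by
  simp only [pvPosFrom, List.mem_filterMap, PySem.List.mem_enumerate_iff]
  constructor
  · rintro ⟨p, ⟨k, hk, rfl⟩, hif⟩
    by_cases h : cs[k] = t
    · refine ⟨k, hk, ?_, h⟩
      simp [h] at hif
      omega
    · simp [h] at hif
  · rintro ⟨k, hk, hx, hc⟩
    exact ⟨(s + k, cs[k]), ⟨k, hk, rfl⟩, by simp [hc, hx]⟩

theorem pv_pairwise_posFrom (cs : List Char) (s : Int) (t : Char) :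
    (pvPosFrom cs s t).Pairwise (· < ·) := by
  induction cs generalizing s with
  | nil => simp [pvPosFrom]
  | cons c rest ih =>
      rw [pvPosFrom, PySem.List.enumerate_cons, List.filterMap_cons]
      by_cases hc : c = t
      · simp only [hc, if_pos]
        refine List.Pairwise.cons ?_ (ih (s + 1))
        intro y hy
        rw [show (List.filterMap (fun ic => if ic.2 = t then some ic.1 else none)
              (PySem.List.enumerate rest (s+1))) = pvPosFrom rest (s+1) t from rfl] at hy
        obtain ⟨k, hk, hy, -⟩ := (pv_mem_posFrom rest (s+1) t y).mp hy
        omega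
      · simp only [if_neg hc]
        exact ih (s + 1)

theorem pv_length_posFrom (cs : List Char) (s : Int) (t : Char) :
    (pvPosFrom cs s t).length = cs.count t := by
  induction cs generalizing s with
  | nil => rfl
  | cons c rest ih =>
      rw [pvPosFrom, PySem.List.enumerate_cons, List.filterMap_cons]
      have hrw : (List.filterMap (fun ic => if ic.2 = t then some ic.1 else none)
          (PySem.List.enumerate rest (s + 1))) = pvPosFrom rest (s + 1) t := rfl
      by_cases hc : c = t
      · simp [hc, hrw, ih (s + 1)]
      · simp [hc, hrw, ih (s + 1)]

theorem pv_mem_merge (cs : List Char) (m a b : Nat) (hm : m ≤ cs.length)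
    (ha : a < m) (hb : b < m) (hab : a ≠ b) (x : Int) :
    (x ∈ pvPosFrom (((cs.set a '1').set b '1').take m) 0 '1'
      ↔ x = (a : Int) ∨ x = (b : Int) ∨ x ∈ pvPosFrom (cs.take m) 0 '1') := by
  simp only [pv_mem_posFrom]
  constructor
  · rintro ⟨k, hk, rfl, hc⟩
    have hkm : k < m := by simp at hk; omega
    have hkc : k < cs.length := by omega
    rw [List.getElem_take] at hc
    by_cases hkb : k = b
    · subst hkb; right; left; omega
    · by_cases hka : k = a
      · subst hka; left; omega
      · right; right
        rw [List.getElem_set_ne (by omega), List.getElem_set_ne (by omega)] at hc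
        exact ⟨k, by simp; omega, by omega, by rw [List.getElem_take]; exact hc⟩
  · intro hx
    rcases hx with rfl | rfl | ⟨k, hk, rfl, hc⟩
    · refine ⟨a, by simp; omega, by omega, ?_⟩
      rw [List.getElem_take, List.getElem_set_ne (by omega), List.getElem_set]
      simp
    · refine ⟨b, by simp; omega, by omega, ?_⟩
      rw [List.getElem_take, List.getElem_set]
      simp
    · have hkm : k < m := by simp at hk; omega
      have hkc : k < cs.length := by omega
      rw [List.getElem_take] at hc
      refine ⟨k, by simp; omega, by omega, ?_⟩
      rw [List.getElem_take]
      by_cases hkb : k = b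
      · subst hkb; rw [List.getElem_set]; simp
      · rw [List.getElem_set_ne (by omega)]
        by_cases hka : k = a
        · subst hka; rw [List.getElem_set]; simp
        · rw [List.getElem_set_ne (by omega)]; exact hc

-- positions of t in a prefix = positions of t, filtered below the cut
theorem pv_posFrom_take (cs : List Char) (m : Nat) (t : Char) (s : Int) :
    pvPosFrom (cs.take m) s t
      = (pvPosFrom cs s t).filter (fun x => decide (x < s + (m : Int))) := by
  induction cs generalizing s m with
  | nil => simp [pvPosFrom]
  | cons c rest ih =>
      cases m with
      | zero =>
          simp only [List.take_zero, Nat.cast_zero, add_zero]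
          rw [show pvPosFrom ([] : List Char) s t = [] from rfl, eq_comm, List.filter_eq_nil_iff]
          intro x hx
          obtain ⟨k, hk, rfl, -⟩ := (pv_mem_posFrom _ _ _ _).mp hx
          simp
      | succ m =>
          rw [List.take_succ_cons, pvPosFrom, pvPosFrom, PySem.List.enumerate_cons,
            PySem.List.enumerate_cons, List.filterMap_cons, List.filterMap_cons]
          have hcast : (s + 1) + (m : Int) = s + ((m + 1 : Nat) : Int) := by push_cast; ring
          have ih' := ih m (s + 1)
          rw [hcast] at ih'
          by_cases hc : c = t
          · simp only [if_pos hc]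
            rw [List.filter_cons]
            have : decide (s < s + ((m + 1 : Nat) : Int)) = true := by
              simp
            rw [this]
            simp only [if_pos]
            rw [show (List.filterMap (fun ic => if ic.2 = t then some ic.1 else none)
              (PySem.List.enumerate rest (s+1))) = pvPosFrom rest (s+1) t from rfl,
              show (List.filterMap (fun ic => if ic.2 = t then some ic.1 else none)
              (PySem.List.enumerate (rest.take m) (s+1))) = pvPosFrom (rest.take m) (s+1) t from rfl]
            rw [ih']
          · simp only [if_neg hc]
            rw [show (List.filterMap (fun ic => if ic.2 = t then some ic.1 else none)
              (PySem.List.enumerate rest (s+1))) = pvPosFrom rest (s+1) t from rfl,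
              show (List.filterMap (fun ic => if ic.2 = t then some ic.1 else none)
              (PySem.List.enumerate (rest.take m) (s+1))) = pvPosFrom (rest.take m) (s+1) t from rfl]
            rw [ih']

-- fold-min bracket
theorem pv_le_foldl_min {α : Type} (l : List α) (f : α → Int) (a d : Int) :
    d ≤ l.foldl (fun c x => min c (f x)) a ↔ d ≤ a ∧ ∀ x ∈ l, d ≤ f x := by
  induction l generalizing a with
  | nil => simp
  | cons x t ih =>
      rw [List.foldl_cons, ih]
      simp only [le_min_iff, List.mem_cons, forall_eq_or_imp]
      tauto

theorem pv_foldl_min_le_init {α : Type} (l : List α) (f : α → Int) (a : Int) :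
    l.foldl (fun c x => min c (f x)) a ≤ a := by
  induction l generalizing a with
  | nil => simp
  | cons x t ih =>
      rw [List.foldl_cons]
      exact le_trans (ih _) (min_le_left _ _)

-- adjacent-gap bound over a strictly sorted list = all-pairs bound
theorem pv_zip_pairs (S : List Int) (hS : S.Pairwise (· < ·)) (d : Int) :
    (∀ ab ∈ S.zip S.tail, d ≤ ab.2 - ab.1) ↔ pvPAIRS d S := by
  induction S with
  | nil => simp [pvPAIRS]
  | cons x t ih =>
      cases t with
      | nil =>
          simp only [List.tail_cons, List.zip_nil_right, List.not_mem_nil, pvPAIRS]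
          constructor
          · intro _ u hu v hv huv
            simp at hu hv; omega
          · intro _ ab hab
            exact absurd hab (by simp)
      | cons b t' =>
          have hpt : (b :: t').Pairwise (· < ·) := hS.tail
          have hxb : x < b := List.rel_of_pairwise_cons hS (by simp)
          have ih' := ih hpt
          rw [show (x :: b :: t').tail = b :: t' from rfl, List.zip_cons_cons]
          constructor
          · intro h
            have h1 : d ≤ b - x := by
              have := h (x, b) (by simp)
              simpa using this
            have h2 : pvPAIRS d (b :: t') := ih'.mp (by
              intro ab hab
              exact h ab (List.mem_cons_of_mem _ hab))
            intro u hu v hv huv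
            rcases List.mem_cons.mp hu with rfl | hu'
            · rcases List.mem_cons.mp hv with rfl | hv'
              · omega
              · rcases List.mem_cons.mp hv' with rfl | hv''
                · exact h1
                · have hbv : b < v := List.rel_of_pairwise_cons hpt hv''
                  have := h2 b (by simp) v (by simp [hv'']) hbv
                  omega
            · rcases List.mem_cons.mp hv with rfl | hv'
              · have := List.rel_of_pairwise_cons hS hu'
                omega
              · exact h2 u hu' v hv' huv
          · intro h ab hab
            rcases List.mem_cons.mp hab with rfl | hab'
            · simpa using h x (by simp) b (by simp) hxb
            · refine ih'.mpr ?_ ab hab'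
              intro u hu v hv huv
              exact h u (by simp [hu]) v (by simp [hv]) huv

theorem pv_adjMin_ge (S : List Int) (hS : S.Pairwise (· < ·)) (N d : Int) :
    d ≤ pvAdjMin S N ↔ d ≤ N ∧ pvPAIRS d S := by
  have hsl : PySem.List.slice S (some 1) none = S.tail := by
    rw [PySem.List.slice_from_one]
  rw [pvAdjMin, hsl, pv_le_foldl_min, pv_zip_pairs S hS d]

theorem pv_mem_pairs (E : List Int) (hE : E.Pairwise (· < ·)) (p q : Int) :
    (p, q) ∈ pvPairs E ↔ p ∈ E ∧ q ∈ E ∧ p < q := by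
  induction E with
  | nil => simp [pvPairs]
  | cons x t ih =>
      have ih' := ih hE.tail
      rw [pvPairs, List.mem_append]
      constructor
      · rintro (hm | hm)
        · obtain ⟨q', hq', heq⟩ := List.mem_map.mp hm
          obtain ⟨rfl, rfl⟩ := Prod.mk.injEq .. ▸ (by
            exact ⟨congrArg Prod.fst heq.symm, congrArg Prod.snd heq.symm⟩ :
              p = x ∧ q = q')
          exact ⟨by simp, by simp [hq'], List.rel_of_pairwise_cons hE hq'⟩
        · obtain ⟨hp, hq, hpq⟩ := ih'.mp hm
          exact ⟨by simp [hp], by simp [hq], hpq⟩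
      · rintro ⟨hp, hq, hpq⟩
        rcases List.mem_cons.mp hp with rfl | hp'
        · rcases List.mem_cons.mp hq with rfl | hq'
          · omega
          · exact Or.inl (List.mem_map.mpr ⟨q, hq', rfl⟩)
        · rcases List.mem_cons.mp hq with rfl | hq'
          · have := List.rel_of_pairwise_cons hE hp'
            omega
          · exact Or.inr (ih'.mpr ⟨hp', hq', hpq⟩)

-- find? on a sorted list returns an element no later than any satisfying one
theorem pv_find_le (E : List Int) (hE : E.Pairwise (· < ·)) (pred : Int → Bool) (p : Int)
    (hp : p ∈ E) (hpred : pred p = true) :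
    ∃ w, E.find? pred = some w ∧ pred w = true ∧ w ∈ E ∧ w ≤ p := by
  revert hE hp
  induction E with
  | nil => intro _ hp; simp at hp
  | cons x t ih =>
      intro hE hp
      by_cases hx : pred x = true
      · refine ⟨x, by simp [hx], hx, by simp, ?_⟩
        rcases List.mem_cons.mp hp with rfl | hp'
        · exact le_refl _
        · exact le_of_lt (List.rel_of_pairwise_cons hE hp')
      · have hpx : p ≠ x := by rintro rfl; exact hx hpred
        have hp' : p ∈ t := by
          rcases List.mem_cons.mp hp with rfl | h
          · exact absurd rfl hpx
          · exact h
        obtain ⟨w, hw1, hw2, hw3, hw4⟩ := ih hE.tail hp'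
        exact ⟨w, by simp [hx, hw1], hw2, by simp [hw3], hw4⟩

-- occupied positions of the m-prefix, and the merged list after seating at a and b
def pvOnes (cs : List Char) (m : Nat) : List Int := pvPosFrom (cs.take m) 0 '1'

def pvS (cs : List Char) (m a b : Nat) : List Int :=
  pvPosFrom (((cs.set a '1').set b '1').take m) 0 '1'

-- "some pair of empty seats below m keeps every pair of occupied seats ≥ d apart"
def pvGood (cs : List Char) (m : Nat) (N d : Int) : Prop :=
  ∃ a b : Nat, a < b ∧ b < m ∧ cs[a]? = some '0' ∧ cs[b]? = some '0' ∧
    d ≤ N ∧ pvPAIRS d (pvS cs m a b)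

theorem pv_far_iff (ones : List Int) (e d : Int) :
    pvFar ones e d = true ↔ ∀ o ∈ ones, d ≤ |e - o| := by
  simp [pvFar]

theorem pv_ones_ne (cs : List Char) (m a : Nat) (ha : a < cs.length) (hca : cs[a] = '0')
    (o : Int) (ho : o ∈ pvOnes cs m) : o ≠ (a : Int) := by
  obtain ⟨k, hk, hkeq, hc⟩ := (pv_mem_posFrom _ _ _ _).mp ho
  have hkc : k < cs.length := by
    have : k < (cs.take m).length := hk
    simp at this; omega
  rw [List.getElem_take] at hc
  intro he
  have : k = a := by omega
  subst this
  rw [hca] at hc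
  exact absurd hc (by decide)

-- decomposition of the merged all-pairs condition
theorem pv_pairs_split (cs : List Char) (m a b : Nat) (hm : m ≤ cs.length)
    (hab : a < b) (hbm : b < m) (ha : a < cs.length) (hb : b < cs.length)
    (hca : cs[a] = '0') (hcb : cs[b] = '0') (d : Int) :
    pvPAIRS d (pvS cs m a b)
      ↔ pvPAIRS d (pvOnes cs m)
        ∧ (∀ o ∈ pvOnes cs m, d ≤ |(a : Int) - o|)
        ∧ (∀ o ∈ pvOnes cs m, d ≤ |(b : Int) - o|)
        ∧ d ≤ (b : Int) - (a : Int) := by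
  have hmem := pv_mem_merge cs m a b hm (by omega) hbm (by omega)
  have hSa : (a : Int) ∈ pvS cs m a b := (hmem _).mpr (Or.inl rfl)
  have hSb : (b : Int) ∈ pvS cs m a b := (hmem _).mpr (Or.inr (Or.inl rfl))
  have hones : ∀ o ∈ pvOnes cs m, o ∈ pvS cs m a b :=
    fun o ho => (hmem o).mpr (Or.inr (Or.inr ho))
  constructor
  · intro h
    refine ⟨fun u hu v hv huv => h u (hones u hu) v (hones v hv) huv, ?_, ?_, ?_⟩
    · intro o ho
      have hne := pv_ones_ne cs m a ha hca o ho
      rcases lt_or_gt_of_ne hne with hlt | hgt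
      · have h1 := h o (hones o ho) (a : Int) hSa hlt
        rw [abs_of_pos (by omega)]
        omega
      · have h1 := h (a : Int) hSa o (hones o ho) hgt
        rw [abs_sub_comm, abs_of_pos (by omega)]
        omega
    · intro o ho
      have hne := pv_ones_ne cs m b hb hcb o ho
      rcases lt_or_gt_of_ne hne with hlt | hgt
      · have h1 := h o (hones o ho) (b : Int) hSb hlt
        rw [abs_of_pos (by omega)]
        omega
      · have h1 := h (b : Int) hSb o (hones o ho) hgt
        rw [abs_sub_comm, abs_of_pos (by omega)]
        omega
    · exact h (a : Int) hSa (b : Int) hSb (by omega)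
  · rintro ⟨hOO, hfa, hfb, hab'⟩ x hx y hy hxy
    rcases (hmem x).mp hx with rfl | rfl | hxo
    · rcases (hmem y).mp hy with rfl | rfl | hyo
      · omega
      · exact hab'
      · have h1 := hfa y hyo
        rw [abs_sub_comm, abs_of_pos (by omega)] at h1
        omega
    · rcases (hmem y).mp hy with rfl | rfl | hyo
      · omega
      · omega
      · have h1 := hfb y hyo
        rw [abs_sub_comm, abs_of_pos (by omega)] at h1
        omega
    · rcases (hmem y).mp hy with rfl | rfl | hyo
      · have h1 := hfa x hxo
        rw [abs_of_pos (by omega)] at h1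
        omega
      · have h1 := hfb x hxo
        rw [abs_of_pos (by omega)] at h1
        omega
      · exact hOO x hxo y hyo hxy

-- membership in the empty-seat list of the m-prefix
theorem pv_mem_zeros (cs : List Char) (m : Nat) (hm : m ≤ cs.length) (x : Int) :
    x ∈ pvPosFrom (cs.take m) 0 '0' ↔ ∃ (k : Nat), k < m ∧ x = (k : Int) ∧ cs[k]? = some '0' := by
  rw [pv_mem_posFrom]
  constructor
  · rintro ⟨k, hk, hxeq, hc⟩
    have hkm : k < m := by
      have h' : k < (List.take m cs).length := hk
      simp at h'; omega
    rw [List.getElem_take] at hc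
    exact ⟨k, hkm, by omega, by rw [List.getElem?_eq_getElem (by omega), hc]⟩
  · rintro ⟨k, hkm, hxeq, hc⟩
    have hkc : k < cs.length := by omega
    rw [List.getElem?_eq_getElem hkc] at hc
    exact ⟨k, by simp; omega, by omega, by rw [List.getElem_take]; exact Option.some.inj hc⟩

-- B's greedy feasibility test decides exactly "some valid pair exists"
theorem pv_feasible_iff (cs : List Char) (m : Nat) (N d : Int) (hm : m ≤ cs.length)
    (hd : 1 ≤ d) :
    pvFeasible (pvPosFrom (cs.take m) 0 '0') (pvOnes cs m) (pvAdjMin (pvOnes cs m) N) d = true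
      ↔ pvGood cs m N d := by
  set E := pvPosFrom (cs.take m) 0 '0' with hE
  set ones := pvOnes cs m with hOnes
  have hEpw : E.Pairwise (· < ·) := pv_pairwise_posFrom _ _ _
  have hOpw : ones.Pairwise (· < ·) := pv_pairwise_posFrom _ _ _
  have hmemE : ∀ x, x ∈ E ↔ ∃ (k : Nat), k < m ∧ x = (k : Int) ∧ cs[k]? = some '0' :=
    fun x => pv_mem_zeros cs m hm x
  constructor
  · intro hfeas
    rw [pvFeasible] at hfeas
    by_cases hcap : pvAdjMin ones N < d
    · rw [if_pos hcap] at hfeas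
      exact absurd hfeas (by simp)
    · rw [if_neg hcap] at hfeas
      have hcap' := (pv_adjMin_ge ones hOpw N d).mp (by omega)
      cases hfind : E.find? (fun e => pvFar ones e d) with
      | none => rw [hfind] at hfeas; exact absurd hfeas (by simp)
      | some first =>
          rw [hfind] at hfeas
          have hfmem : first ∈ E := List.mem_of_find?_eq_some hfind
          have hfpred : pvFar ones first d = true := by simpa using List.find?_some hfind
          obtain ⟨e, hemem, hcond⟩ := List.any_eq_true.mp hfeas
          rw [Bool.and_eq_true] at hcond
          obtain ⟨hde, hefar⟩ := hcond
          have hde' : d ≤ e - first := of_decide_eq_true hde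
          obtain ⟨ka, hkam, rfl, hca⟩ := (hmemE first).mp hfmem
          obtain ⟨kb, hkbm, rfl, hcb⟩ := (hmemE e).mp hemem
          refine ⟨ka, kb, by omega, hkbm, hca, hcb, hcap'.1, ?_⟩
          rw [pv_pairs_split cs m ka kb hm (by omega) hkbm (by omega) (by omega)
            (by rw [List.getElem?_eq_getElem (by omega)] at hca; exact Option.some.inj hca)
            (by rw [List.getElem?_eq_getElem (by omega)] at hcb; exact Option.some.inj hcb)]
          exact ⟨hcap'.2, (pv_far_iff _ _ _).mp hfpred, (pv_far_iff _ _ _).mp hefar, hde'⟩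
  · rintro ⟨a, b, hab, hbm, hca, hcb, hdN, hP⟩
    have ha : a < cs.length := by omega
    have hb : b < cs.length := by omega
    have hca' : cs[a] = '0' := by rw [List.getElem?_eq_getElem ha] at hca; exact Option.some.inj hca
    have hcb' : cs[b] = '0' := by rw [List.getElem?_eq_getElem hb] at hcb; exact Option.some.inj hcb
    rw [pv_pairs_split cs m a b hm hab hbm ha hb hca' hcb'] at hP
    obtain ⟨hOO, hfa, hfb, hab'⟩ := hP
    rw [pvFeasible, if_neg (not_lt.mpr ((pv_adjMin_ge ones hOpw N d).mpr ⟨hdN, hOO⟩))]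
    have haE : (a : Int) ∈ E := (hmemE _).mpr ⟨a, by omega, rfl, hca⟩
    have hbE : (b : Int) ∈ E := (hmemE _).mpr ⟨b, hbm, rfl, hcb⟩
    obtain ⟨w, hw1, hw2, hw3, hw4⟩ :=
      pv_find_le E hEpw (fun e => pvFar ones e d) (a : Int) haE
        ((pv_far_iff _ _ _).mpr hfa)
    rw [hw1]
    refine List.any_eq_true.mpr ⟨(b : Int), hbE, ?_⟩
    rw [Bool.and_eq_true]
    exact ⟨decide_eq_true (by omega), (pv_far_iff _ _ _).mpr hfb⟩

-- A's nested index loops as a fold over the pair list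
theorem pv_nest (E : List Int) (g : Int → Int → Int) :
    ∀ (l : List Int) (k : Nat), E.drop k = l → ∀ (init : Int),
      (PySem.List.enumerate l (k : Int)).foldl
        (fun acc ip => (E.drop (ip.1 + 1).toNat).foldl (fun a q => max a (g ip.2 q)) acc) init
      = (pvPairs l).foldl (fun a pq => max a (g pq.1 pq.2)) init := by
  intro l
  induction l with
  | nil => intro k hk init; rfl
  | cons x t ih =>
      intro k hk init
      rw [PySem.List.enumerate_cons, List.foldl_cons]
      have hdrop : E.drop (k + 1) = t := by
        have h1 := congrArg (List.drop 1) hk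
        rw [List.drop_drop] at h1
        simpa [Nat.add_comm] using h1
      have hcast : ((k : Int) + 1).toNat = k + 1 := by omega
      simp only [hcast, hdrop]
      rw [pvPairs, List.foldl_append, List.foldl_map,
        show (k : Int) + 1 = ((k + 1 : Nat) : Int) by push_cast; ring]
      exact ih (k + 1) hdrop _

-- a running max over a projection: attained value
theorem pv_fold_max_cases (l : List (Int × Int)) (f : Int × Int → Int) (init : Int) :
    l.foldl (fun a pq => max a (f pq)) init = init
      ∨ ∃ pq ∈ l, l.foldl (fun a pq => max a (f pq)) init = f pq := by
  have h : l.foldl (fun a pq => max a (f pq)) init = (l.map f).foldl max init :=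
    (List.foldl_map).symm
  rcases PySem.List.foldl_max_mem (l.map f) init with h1 | h1
  · left; rw [h]; exact h1
  · right
    obtain ⟨pq, hpq, he⟩ := List.mem_map.mp h1
    exact ⟨pq, hpq, by rw [h, ← he]⟩

theorem pv_fold_max_bounds (l : List (Int × Int)) (f : Int × Int → Int) (init : Int) :
    init ≤ l.foldl (fun a pq => max a (f pq)) init
      ∧ ∀ pq ∈ l, f pq ≤ l.foldl (fun a pq => max a (f pq)) init := by
  have h : l.foldl (fun a pq => max a (f pq)) init = (l.map f).foldl max init :=
    (List.foldl_map).symm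
  rw [h]
  obtain ⟨h1, h2⟩ := PySem.List.le_foldl_max (l.map f) init
  exact ⟨h1, fun pq hpq => h2 _ (List.mem_map.mpr ⟨pq, hpq, rfl⟩)⟩

-- the binary search finds the threshold of the (monotone-by-equivalence) test
theorem pv_bs (E ones : List Int) (cap T : Int)
    (hfeas : ∀ d, 1 ≤ d → (pvFeasible E ones cap d = true ↔ d ≤ T)) :
    ∀ (n : Nat) (lo hi : Int), (hi - lo).toNat = n → 0 ≤ lo → lo ≤ T → T ≤ hi →
      pvBS E ones cap lo hi = T := by
  intro n
  induction n using Nat.strong_induction_on with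
  | _ n ih =>
      intro lo hi hn h0 hloT hThi
      rw [pvBS]
      by_cases h : lo < hi
      · rw [dif_pos h]
        have hb := PySem.Int.floordiv_two_mid_bounds (lo := lo + 1) (hi := hi) (by omega)
        rw [show lo + 1 + hi = lo + hi + 1 by ring] at hb
        set mid := PySem.Int.floordiv (lo + hi + 1) 2 with hmid
        have hmid1 : 1 ≤ mid := by omega
        by_cases hF : pvFeasible E ones cap mid = true
        · simp only [hF, if_true]
          have hmT : mid ≤ T := (hfeas mid hmid1).mp hF
          exact ih (hi - mid).toNat (by omega) mid hi rfl (by omega) hmT hThi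
        · simp only [hF, Bool.false_eq_true, if_false]
          have hmT : T ≤ mid - 1 := by
            by_contra hc
            exact hF ((hfeas mid hmid1).mpr (by omega))
          exact ih (mid - 1 - lo).toNat (by omega) lo (mid - 1) rfl h0 hloT hmT
      · rw [dif_neg h]
        omega

-- per-pair value of A = min of adjacent differences of the merged occupied list
theorem pv_pair' (cs : List Char) (N : Int) (a b : Nat) (h0 : 0 ≤ N)
    (hN : N ≤ (cs.length : Int)) :
    (pvScanA N ((cs.set a '1').set b '1')).1 = pvAdjMin (pvS cs N.toNat a b) N := by
  have hlen2 : ((((cs.set a '1').set b '1').length : Nat) : Int) = (cs.length : Int) := by simp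
  rw [pv_scanA_take _ N h0 (by rw [hlen2]; exact hN), pvPositions_eq_posFrom]
  have hnn : ∀ y ∈ pvPosFrom (((cs.set a '1').set b '1').take N.toNat) 0 '1', 0 ≤ y := by
    intro y hy
    obtain ⟨k, hk, hyeq, -⟩ := (pv_mem_posFrom _ _ _ _).mp hy
    omega
  rw [pv_adjmin _ N hnn]
  rfl

theorem pv_fold_keep {α : Type} (l : List α) (F : Int → α → Int)
    (hF : ∀ a x, 0 ≤ a → F a x = a) : ∀ acc, 0 ≤ acc → l.foldl F acc = acc := by
  induction l with
  | nil => intro acc _; rfl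
  | cons x t ih =>
      intro acc h
      rw [List.foldl_cons, hF _ _ h]
      exact ih acc h

-- A returns 0 when there are fewer than two empty seats
theorem pv_A_small (N : Int) (seats : String)
    (h : (pvPositions seats.toList '0').length ≤ 1) : max_min_distance N seats = 0 := by
  rw [max_min_distance]
  cases hE : pvPositions seats.toList '0' with
  | nil =>
      rw [PySem.List.pyRange_one_eq_nil (by simp)]
      rfl
  | cons x t =>
      cases t with
      | cons y t' => rw [hE] at h; simp at h
      | nil =>
          have h1 : (([x] : List Int).length : Int) = 1 := by simp
          rw [h1, PySem.List.pyRange_one_cons (by omega), PySem.List.pyRange_one_eq_nil (by omega),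
            List.foldl_cons, PySem.List.pyRange_one_eq_nil (by omega)]
          rfl

-- A returns 0 when N ≤ 0 (the scan range is empty, every candidate value is N ≤ 0)
theorem pv_A_nonpos (N : Int) (seats : String) (hN : N ≤ 0) : max_min_distance N seats = 0 := by
  have hscan : ∀ arr : List Char, (pvScanA N arr).1 = N := by
    intro arr
    rw [pvScanA, PySem.List.pyRange_one_eq_nil hN]
    rfl
  rw [max_min_distance]
  refine pv_fold_keep _ _ ?_ 0 le_rfl
  intro a i ha
  refine pv_fold_keep _ _ ?_ a ha
  intro a2 j ha2
  simp only [hscan]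
  exact max_eq_left (by omega)

theorem pv_slice_count (cs : List Char) (N : Int) (c : Char) :
    (PySem.List.slice cs none (some N)).count c ≤ cs.count c := by
  rw [show PySem.List.slice cs none (some N)
      = cs.take (PySem.List.clampIdx cs.length N) from rfl]
  exact (List.take_sublist _ _).count_le c

-- B returns 0 when its room has fewer than two empty seats
theorem pv_B_small (N : Int) (seats : String)
    (h : (pvPositions (PySem.List.slice seats.toList none (some N)) '0').length < 2) :
    max_min_distance_alt N seats = 0 := by
  rw [max_min_distance_alt, if_pos h]

-- B returns 0 when N ≤ 0 (the search interval [1, N] is empty)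
theorem pv_B_nonpos (N : Int) (seats : String) (hN : N ≤ 0) :
    max_min_distance_alt N seats = 0 := by
  rw [max_min_distance_alt]
  by_cases h : (pvPositions (PySem.List.slice seats.toList none (some N)) '0').length < 2
  · rw [if_pos h]
  · rw [if_neg h, pvBS, dif_neg (by omega)]

-- the value A computes in the main case, as a closed fold over the pair list
def pvT (cs : List Char) (m : Nat) (N : Int) : Int :=
  (pvPairs (pvPosFrom (cs.take m) 0 '0')).foldl
    (fun a pq => max a (pvAdjMin (pvS cs m pq.1.toNat pq.2.toNat) N)) 0

theorem pv_T_bounds (cs : List Char) (m : Nat) (N : Int) (hN1 : 1 ≤ N) :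
    0 ≤ pvT cs m N ∧ pvT cs m N ≤ N := by
  have hbounds := pv_fold_max_bounds (pvPairs (pvPosFrom (cs.take m) 0 '0'))
      (fun pq => pvAdjMin (pvS cs m pq.1.toNat pq.2.toNat) N) 0
  refine ⟨hbounds.1, ?_⟩
  rcases pv_fold_max_cases (pvPairs (pvPosFrom (cs.take m) 0 '0'))
      (fun pq => pvAdjMin (pvS cs m pq.1.toNat pq.2.toNat) N) 0 with h1 | ⟨pq, hpq, h1⟩
  · rw [pvT, h1]; omega
  · rw [pvT, h1, pvAdjMin]
    exact pv_foldl_min_le_init _ _ _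

theorem pv_T_good (cs : List Char) (m : Nat) (N : Int) (hmlen : m ≤ cs.length) :
    ∀ d, 1 ≤ d → (pvGood cs m N d ↔ d ≤ pvT cs m N) := by
  intro d hd
  have hEpw : (pvPosFrom (cs.take m) 0 '0').Pairwise (· < ·) := pv_pairwise_posFrom _ _ _
  have hbounds := pv_fold_max_bounds (pvPairs (pvPosFrom (cs.take m) 0 '0'))
      (fun pq => pvAdjMin (pvS cs m pq.1.toNat pq.2.toNat) N) 0
  constructor
  · rintro ⟨a, b, hab, hbm, hca, hcb, hdN, hP⟩
    have hf : d ≤ pvAdjMin (pvS cs m a b) N :=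
      (pv_adjMin_ge _ (pv_pairwise_posFrom _ _ _) N d).mpr ⟨hdN, hP⟩
    have hmem : ((a : Int), (b : Int)) ∈ pvPairs (pvPosFrom (cs.take m) 0 '0') :=
      (pv_mem_pairs _ hEpw _ _).mpr
        ⟨(pv_mem_zeros cs m hmlen _).mpr ⟨a, by omega, rfl, hca⟩,
         (pv_mem_zeros cs m hmlen _).mpr ⟨b, hbm, rfl, hcb⟩, by omega⟩
    have hle := hbounds.2 _ hmem
    simp only [Int.toNat_natCast] at hle
    rw [pvT]
    omega
  · intro hdT
    rcases pv_fold_max_cases (pvPairs (pvPosFrom (cs.take m) 0 '0'))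
        (fun pq => pvAdjMin (pvS cs m pq.1.toNat pq.2.toNat) N) 0 with h1 | ⟨pq, hpq, h1⟩
    · exfalso; rw [pvT, h1] at hdT; omega
    · obtain ⟨hp, hq, hpq'⟩ := (pv_mem_pairs _ hEpw _ _).mp hpq
      obtain ⟨ka, hkam, hkaeq, hca⟩ := (pv_mem_zeros cs m hmlen _).mp hp
      obtain ⟨kb, hkbm, hkbeq, hcb⟩ := (pv_mem_zeros cs m hmlen _).mp hq
      have hdf : d ≤ pvAdjMin (pvS cs m pq.1.toNat pq.2.toNat) N := by
        rw [pvT, h1] at hdT; exact hdT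
      rw [hkaeq, hkbeq] at hdf
      simp only [Int.toNat_natCast] at hdf
      have hgt := (pv_adjMin_ge _ (pv_pairwise_posFrom _ _ _) N d).mp hdf
      exact ⟨ka, kb, by omega, hkbm, hca, hcb, hgt.1, hgt.2⟩

-- the main case: 1 ≤ N ≤ len(seats), ≥ 2 empty seats, none of them beyond N
theorem pv_main (N : Int) (seats : String) (hN1 : 1 ≤ N)
    (hlen : N ≤ (seats.toList.length : Int)) (hcnt : 2 ≤ seats.toList.count '0')
    (hnz : (seats.toList.drop N.toNat).count '0' = 0) :
    max_min_distance N seats = max_min_distance_alt N seats := by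
  have hmlen : N.toNat ≤ seats.toList.length := by omega
  have hnomem : '0' ∉ seats.toList.drop N.toNat := List.count_eq_zero.mp hnz
  -- the empty-seat lists of A and B coincide
  have hEtake : pvPosFrom (seats.toList.take N.toNat) 0 '0' = pvPositions seats.toList '0' := by
    rw [pvPositions_eq_posFrom, pv_posFrom_take seats.toList N.toNat '0' 0]
    refine List.filter_eq_self.mpr ?_
    intro x hx
    obtain ⟨k, hk, hxeq, hck⟩ := (pv_mem_posFrom _ _ _ _).mp hx
    by_cases hkm : k < N.toNat
    · simp; omega
    · exfalso
      refine hnomem ?_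
      have hkd : k - N.toNat < (seats.toList.drop N.toNat).length := by rw [List.length_drop]; omega
      have heq : (seats.toList.drop N.toNat)[k - N.toNat] = seats.toList[k] := by
        rw [List.getElem_drop]
        congr 1
        omega
      have hmem0 : (seats.toList.drop N.toNat)[k - N.toNat] ∈ seats.toList.drop N.toNat :=
        List.getElem_mem hkd
      rw [heq, hck] at hmem0
      exact hmem0
  -- A computes pvT
  have hA2 : max_min_distance N seats = pvT seats.toList N.toNat N := by
    have hA : max_min_distance N seats
        = (pvPairs (pvPositions seats.toList '0')).foldl
            (fun a pq =>
              max a (pvScanA N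
                ((seats.toList.set pq.1.toNat '1').set pq.2.toNat '1')).1) 0 := by
      rw [max_min_distance]
      refine Eq.trans ?_ (pv_nest (pvPositions seats.toList '0')
        (fun p q => (pvScanA N ((seats.toList.set p.toNat '1').set q.toNat '1')).1)
        (pvPositions seats.toList '0') 0 rfl 0)
      rw [show ((0 : Nat) : Int) = (0 : Int) by simp]
      rw [PySem.List.enumerate_eq_map_pyRange (pvPositions seats.toList '0') (0 : Int),
        List.foldl_map]
      refine PySem.List.foldl_congr_mem _ _ _ _ ?_
      intro acc i hi
      obtain ⟨hi0, hilen⟩ := PySem.List.mem_pyRange_one.mp hi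
      rw [PySem.List.foldl_pyRange_pyGetD' (pvPositions seats.toList '0') 0
        (fun acc q => max acc (pvScanA N
          ((seats.toList.set (PySem.List.pyGetD (pvPositions seats.toList '0') i 0).toNat '1').set
            q.toNat '1')).1) acc
        (a := i + 1) (by omega)]
    rw [hA, pvT, hEtake]
    refine PySem.List.foldl_congr_mem _ _ _ _ ?_
    intro acc pq hpq
    rw [pv_pair' seats.toList N pq.1.toNat pq.2.toNat (by omega) hlen]
  -- B runs the binary search on the same data
  have hroom : PySem.List.slice seats.toList none (some N) = seats.toList.take N.toNat :=
    PySem.List.slice_to _ (by omega)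
  have hcnt' : 2 ≤ (seats.toList.take N.toNat).count '0' := by
    have hsplit : seats.toList.count '0'
        = (seats.toList.take N.toNat).count '0' + (seats.toList.drop N.toNat).count '0' := by
      rw [← List.count_append, List.take_append_drop]
    omega
  have hB : max_min_distance_alt N seats = pvT seats.toList N.toNat N := by
    rw [max_min_distance_alt, hroom, pvPositions_eq_posFrom]
    have hElen : ¬ (pvPosFrom (seats.toList.take N.toNat) 0 '0').length < 2 := by
      rw [pv_length_posFrom]
      omega
    rw [if_neg hElen]
    have hTb := pv_T_bounds seats.toList N.toNat N hN1
    refine pv_bs _ _ _ (pvT seats.toList N.toNat N) ?_ (N - 0).toNat 0 N (by omega)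
      le_rfl hTb.1 hTb.2
    intro d hd
    rw [show pvPositions (seats.toList.take N.toNat) '1' = pvOnes seats.toList N.toNat from rfl]
    rw [show ((pvOnes seats.toList N.toNat).zip
        (PySem.List.slice (pvOnes seats.toList N.toNat) (some 1) none)).foldl
        (fun c ab => min c (ab.2 - ab.1)) N = pvAdjMin (pvOnes seats.toList N.toNat) N from rfl]
    rw [pv_feasible_iff seats.toList N.toNat N d hmlen hd]
    exact pv_T_good seats.toList N.toNat N hmlen d hd
  rw [hA2, hB]

-- ===== VERDICT (by name: the statement is the Claim_ definition above) =====
theorem max_min_distance_spec : Claim_equal_max_min_distance := by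
  intro N seats _ hPre
  unfold Pre_max_min_distance at hPre
  obtain ⟨hPre1, hPre2⟩ := hPre
  show max_min_distance N seats = max_min_distance_alt N seats
  by_cases hcnt : seats.toList.count '0' < 2
  · have hA := pv_A_small N seats (by rw [pvPositions_eq_posFrom, pv_length_posFrom]; omega)
    have hB := pv_B_small N seats (by
      rw [pvPositions_eq_posFrom, pv_length_posFrom]
      have := pv_slice_count seats.toList N '0'
      omega)
    rw [hA, hB]
  · have hlen : N ≤ (seats.toList.length : Int) := by
      rcases hPre1 with h | h
      · exact h
      · omega
    by_cases hN1 : N ≤ 0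
    · rw [pv_A_nonpos N seats hN1, pv_B_nonpos N seats hN1]
    · have hN1' : 1 ≤ N := by omega
      have hnz : (seats.toList.drop N.toNat).count '0' = 0 := by
        by_contra hc
        exact hPre2 ⟨by omega, by omega, by omega⟩
      exact pv_main N seats hN1' hlen (by omega) hnz
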